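-- pv_equiv track=rewrite | github.com/Cleankz/salary | salary.py | SynchronizingTables
-- ===== SOURCE A (Python) =====
-- def sort(N,m = []):
--     # сортируем зарплаты
--     mas = m
--     size = N
--     done = True # flag - done
--     while(done):
--         done = False
--         for i in range(size-1):
--             if mas[i] >= mas[i+1]:
--                 mas[i], mas[i+1] = mas[i+1], mas[i]
--                 done = True
--     return mas
--
-- def SynchronizingTables (N ,ids = [],salary = []):
--     done = True # flag - done
--     copy_ind = []
--     for i in range(N):
--         copy_ind.append(ids[i])
--
--     sort_salary = sort(N,salary) # сортируем зарплату
--     sort_ind = sort(N,copy_ind) # сортируем индексы рабочих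
--     new_array = []
--     for x in range(N):
--         for y in range(N):
--             if ids[x] == sort_ind[y]:
--                 new_array.append(salary[y])
--
--     return new_array
-- ===== SOURCE B (Python) =====
-- def SynchronizingTables(N, ids=[], salary=[]):
--     # Note: unlike A, this does NOT sort `salary` in place; equivalence is about the return value.
--     rank = dict(zip(sorted(ids[:N]), sorted(salary[:N])))
--     return [rank[i] for i in ids[:N]]
-- ===== Notes on version B (the rewrite author's own statement) =====
-- stated objective: alternative
-- what changed: Replaces A's repeated bubble-sort passes and quadratic nested matching scan by built-in sorted() plus a dict mapping each id (by sorted rank) to the salary of the same rank, read off in one lookup pass; intended as the O(n log n) version, though a timing run could not confirm a measurable speed-up (A's runtimes were below the measurable floor at the sizes both finish).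
-- outside the precondition, e.g. on SynchronizingTables(-1, [1, 2], [10, 20]): A returns [], B returns [10]
import Mathlib
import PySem

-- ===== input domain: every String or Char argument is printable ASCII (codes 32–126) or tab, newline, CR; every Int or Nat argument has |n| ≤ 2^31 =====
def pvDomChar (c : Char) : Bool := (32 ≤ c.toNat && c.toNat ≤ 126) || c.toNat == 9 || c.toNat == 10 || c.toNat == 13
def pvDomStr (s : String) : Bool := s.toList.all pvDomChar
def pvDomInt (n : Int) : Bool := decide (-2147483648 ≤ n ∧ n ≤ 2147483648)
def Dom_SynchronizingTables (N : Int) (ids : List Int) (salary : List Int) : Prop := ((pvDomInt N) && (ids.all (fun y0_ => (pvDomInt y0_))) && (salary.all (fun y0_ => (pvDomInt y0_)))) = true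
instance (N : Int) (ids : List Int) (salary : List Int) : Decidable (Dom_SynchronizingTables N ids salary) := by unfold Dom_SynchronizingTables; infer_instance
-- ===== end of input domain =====

-- B replaces A's repeated bubble passes and quadratic matching scan by library sorts plus a
-- rank dictionary (a different algorithm); A additionally sorts `salary` in place — the
-- equivalence proved here is about the return value only.


-- ===== PORT A =====
-- One pass of the inner `for i in range(size-1)` loop of `sort`: the first argument counts the
-- remaining comparisons (size-1 at the start); swaps happen exactly when mas[i] >= mas[i+1],
-- and the returned Bool is the `done` flag accumulated over the pass.
def pvPassA : Nat → List Int → List Int × Bool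
  | _, [] => ([], false)
  | 0, l => (l, false)
  | _ + 1, [a] => ([a], false)
  | k + 1, a :: b :: rest =>
      if b ≤ a then
        let r := pvPassA k (a :: rest)
        (b :: r.1, true)
      else
        let r := pvPassA k (b :: rest)
        (a :: r.1, r.2)

-- The `while(done)` loop of `sort`.  The Nat fuel only makes the loop total: inside
-- Pre_ (distinct values among the first N) the loop converges long before the fuel
-- (chosen ≥ inversion count + 1) runs out, so the port computes exactly what A computes.
def pvSortLoopA : Nat → Nat → List Int → List Int
  | 0, _, l => l
  | f + 1, n, l =>
      let r := pvPassA (n - 1) l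
      if r.2 then pvSortLoopA f n r.1 else r.1

-- `sort(N, m)`
def pvSortA (N : Int) (m : List Int) : List Int :=
  pvSortLoopA (m.length * m.length + 1) N.toNat m

def SynchronizingTables (N : Int) (ids : List Int) (salary : List Int) : List Int :=
  -- copy_ind = [ids[i] for i in range(N)]  (ids[i]: IndexError only outside Pre_)
  let copy_ind := (PySem.List.pyRange 0 N 1).foldl (fun acc i => acc ++ [PySem.List.pyGetD ids i 0]) []
  let sort_salary := pvSortA N salary       -- sorts `salary` in place: salary[y] below reads it
  let sort_ind := pvSortA N copy_ind
  (PySem.List.pyRange 0 N 1).foldl (fun acc x =>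
    (PySem.List.pyRange 0 N 1).foldl (fun acc2 y =>
      if PySem.List.pyGetD ids x 0 = PySem.List.pyGetD sort_ind y 0
      then acc2 ++ [PySem.List.pyGetD sort_salary y 0] else acc2) acc) []

-- ===== PORT B =====
def SynchronizingTables_alt (N : Int) (ids : List Int) (salary : List Int) : List Int :=
  let idsN := PySem.List.slice ids none (some N)
  let rank := PySem.Dict.ofList
    ((PySem.List.sorted idsN (fun x => x)).zip (PySem.List.sorted (PySem.List.slice salary none (some N)) (fun x => x)))
  idsN.map (fun i => rank.getD i 0)   -- rank[i]: a KeyError is impossible under Pre_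

-- ===== PRECONDITION & SPEC =====
-- Pre_ keeps the natural domain of the task: N is a count (negative N is malformed input, on
-- which A accidentally returns []), N ≤ both lengths (otherwise ids[i]/salary[i] raises
-- IndexError), and the first N ids and first N salaries are pairwise distinct (on a duplicate,
-- A's `>=`-swapping bubble sort swaps equal neighbours forever and never returns).
def Pre_SynchronizingTables (N : Int) (ids : List Int) (salary : List Int) : Prop :=
  0 ≤ N ∧ N ≤ ids.length ∧ N ≤ salary.length ∧
    (ids.take N.toNat).Nodup ∧ (salary.take N.toNat).Nodup
instance (N : Int) (ids : List Int) (salary : List Int) : Decidable (Pre_SynchronizingTables N ids salary) := by unfold Pre_SynchronizingTables; infer_instance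

def pvWitness_SynchronizingTables : Int × List Int × List Int := (3, [3, 1, 2], [30, 10, 20])

def Spec_SynchronizingTables (N : Int) (ids : List Int) (salary : List Int) (out : List Int) : Prop := out = SynchronizingTables_alt N ids salary
instance (N : Int) (ids : List Int) (salary : List Int) (out : List Int) : Decidable (Spec_SynchronizingTables N ids salary out) := by unfold Spec_SynchronizingTables; infer_instance

-- ===== CLAIM (what is proved, stated in full; the proofs are below) =====
def Claim_equal_SynchronizingTables : Prop := ∀ (N : Int) (ids : List Int) (salary : List Int), Dom_SynchronizingTables N ids salary → Pre_SynchronizingTables N ids salary → Spec_SynchronizingTables N ids salary (SynchronizingTables N ids salary)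

-- ===== LEMMAS AND PROOFS =====

def bpass : List Int → List Int × Bool
  | [] => ([], false)
  | [a] => ([a], false)
  | a :: b :: rest =>
      if b ≤ a then
        let r := bpass (a :: rest)
        (b :: r.1, true)
      else
        let r := bpass (b :: rest)
        (a :: r.1, r.2)

def pvInv : List Int → Nat
  | [] => 0
  | a :: r => r.countP (fun b => decide (b < a)) + pvInv r

theorem bpass_perm : ∀ (t : List Int), (bpass t).1.Perm t := by
  intro t
  induction t using bpass.induct with
  | case1 => simp [bpass]
  | case2 a => simp [bpass]
  | case3 a b rest h ih =>
      simp only [bpass, h, if_pos]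
      exact ((ih.cons b).trans (List.Perm.swap a b rest))
  | case4 a b rest h ih =>
      simp only [bpass, h, if_neg, ite_false]
      exact ih.cons a

theorem bpass_false : ∀ (t : List Int), (bpass t).2 = false →
    (bpass t).1 = t ∧ t.Pairwise (· < ·) := by
  intro t
  induction t using bpass.induct with
  | case1 => simp [bpass]
  | case2 a => simp [bpass]
  | case3 a b rest h ih => simp [bpass, h]
  | case4 a b rest h ih =>
      intro hdone
      simp only [bpass, h, ite_false] at hdone ⊢
      obtain ⟨he, hp⟩ := ih hdone
      refine ⟨by simp [he], ?_⟩
      have hab : a < b := by omega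
      refine List.Pairwise.cons ?_ hp
      intro y hy
      rcases hy with _ | hy
      · exact hab
      · exact hab.trans (List.rel_of_pairwise_cons hp (by assumption))

theorem bpass_inv_le : ∀ (t : List Int), pvInv (bpass t).1 ≤ pvInv t := by
  intro t
  induction t using bpass.induct with
  | case1 => simp [bpass]
  | case2 a => simp [bpass]
  | case3 a b rest h ih =>
      simp only [bpass, h, if_pos, pvInv]
      have hperm := (bpass_perm (a :: rest)).countP_eq (fun x => decide (x < b))
      rw [hperm]
      have hab : ¬ (a < b) := by omega
      have e1 : List.countP (fun x => decide (x < b)) (a :: rest) = List.countP (fun x => decide (x < b)) rest := by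
        simp [List.countP_cons, hab]
      have e2 : List.countP (fun x => decide (x < a)) rest ≤ List.countP (fun x => decide (x < a)) (b :: rest) := by
        simp [List.countP_cons]
      simp only [pvInv] at ih
      omega
  | case4 a b rest h ih =>
      simp only [bpass, ite_false, h, pvInv]
      have hperm := (bpass_perm (b :: rest)).countP_eq (fun x => decide (x < a))
      rw [hperm]
      simp only [pvInv] at ih
      omega

theorem bpass_inv_lt : ∀ (t : List Int), t.Nodup → (bpass t).2 = true →
    pvInv (bpass t).1 < pvInv t := by
  intro t
  induction t using bpass.induct with
  | case1 => simp [bpass]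
  | case2 a => simp [bpass]
  | case3 a b rest h ih =>
      intro hnd _
      simp only [bpass, h, if_pos, pvInv]
      have hperm := (bpass_perm (a :: rest)).countP_eq (fun x => decide (x < b))
      rw [hperm]
      have hne : a ≠ b := by
        intro he; exact (List.nodup_cons.mp hnd).1 (he ▸ List.mem_cons_self ..)
      have hba : b < a := by
        rcases lt_or_ge b a with h' | h'
        · exact h'
        · omega
      have hle := bpass_inv_le (a :: rest)
      simp only [pvInv] at hle
      have e1 : List.countP (fun x => decide (x < b)) (a :: rest) = List.countP (fun x => decide (x < b)) rest := by
        simp [List.countP_cons]; omega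
      have e2 : List.countP (fun x => decide (x < a)) (b :: rest) = List.countP (fun x => decide (x < a)) rest + 1 := by
        simp [List.countP_cons, hba]
      omega
  | case4 a b rest h ih =>
      intro hnd hdone
      simp only [bpass, ite_false, h, pvInv] at hdone ⊢
      have hperm := (bpass_perm (b :: rest)).countP_eq (fun x => decide (x < a))
      rw [hperm]
      have := ih (List.nodup_cons.mp hnd).2 hdone
      simp only [pvInv] at this
      omega

theorem pvPassA_split : ∀ (t d : List Int), t ≠ [] →
    pvPassA (t.length - 1) (t ++ d) = ((bpass t).1 ++ d, (bpass t).2) := by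
  intro t
  induction t using bpass.induct with
  | case1 => simp
  | case2 a =>
      intro d _
      cases d <;> simp [pvPassA, bpass]
  | case3 a b rest h ih =>
      intro d _
      have hi := ih d (by simp)
      simp only [List.cons_append] at hi
      have hlen : (a :: b :: rest).length - 1 = (a :: rest).length - 1 + 1 := by simp
      rw [hlen]
      simp only [List.cons_append, pvPassA, bpass, h, if_pos]
      rw [hi]
  | case4 a b rest h ih =>
      intro d _
      have hi := ih d (by simp)
      simp only [List.cons_append] at hi
      have hlen : (a :: b :: rest).length - 1 = (b :: rest).length - 1 + 1 := by simp
      rw [hlen]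
      simp only [List.cons_append, pvPassA, bpass, h, ite_false]
      rw [hi]

theorem pvInv_le_sq : ∀ (t : List Int), pvInv t ≤ t.length * t.length := by
  intro t
  induction t with
  | nil => simp [pvInv]
  | cons a r ih =>
      simp only [pvInv, List.length_cons]
      have := List.countP_le_length (p := fun b => decide (b < a)) (l := r)
      nlinarith

theorem pvPassA_zero (l : List Int) : pvPassA 0 l = (l, false) := by
  cases l <;> simp [pvPassA]

theorem pvSortLoopA_eq : ∀ (f : Nat) (t d : List Int), t.Nodup → pvInv t < f →
    pvSortLoopA f t.length (t ++ d) = PySem.List.sorted t (fun x => x) ++ d := by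
  intro f
  induction f with
  | zero => omega
  | succ f ih =>
      intro t d hnd hinv
      by_cases hne : t = []
      · subst hne
        simp [pvSortLoopA, pvPassA_zero, PySem.List.sorted]
      · simp only [pvSortLoopA]
        rw [show t.length - 1 = t.length - 1 from rfl]
        have hsplit := pvPassA_split t d hne
        rw [hsplit]
        cases hdone : (bpass t).2 with
        | false =>
            obtain ⟨he, hp⟩ := bpass_false t hdone
            rw [PySem.List.sorted_eq_of_perm_of_pairwise_lt t t (fun x => x) (List.Perm.refl t) hp]
            simp [hdone, he]
        | true =>
            simp only [hdone, if_pos]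
            have hperm := bpass_perm t
            have hnd' : (bpass t).1.Nodup := hperm.nodup_iff.mpr hnd
            have hinv' : pvInv (bpass t).1 < f := by
              have := bpass_inv_lt t hnd hdone; omega
            have hlen : t.length = (bpass t).1.length := (hperm.length_eq).symm
            rw [hlen, ih (bpass t).1 d hnd' hinv',
              PySem.List.sorted_eq_sorted_of_perm (bpass t).1 t (fun x => x)
                (fun _ _ h => h) hperm]

theorem pvSortA_eq (N : Int) (m : List Int) (h0 : 0 ≤ N) (hl : N ≤ m.length)
    (hnd : (m.take N.toNat).Nodup) :
    pvSortA N m = PySem.List.sorted (m.take N.toNat) (fun x => x) ++ m.drop N.toNat := by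
  have hlen : (m.take N.toNat).length = N.toNat := by
    simp [List.length_take]; omega
  have hinv : pvInv (m.take N.toNat) < m.length * m.length + 1 := by
    have h1 := pvInv_le_sq (m.take N.toNat)
    have h2 : (m.take N.toNat).length ≤ m.length := by simp [List.length_take]
    nlinarith
  have := pvSortLoopA_eq (m.length * m.length + 1) (m.take N.toNat) (m.drop N.toNat) hnd hinv
  rw [hlen, List.take_append_drop] at this
  exact this


theorem map_getD_range (l : List Int) (n : Nat) (h : n ≤ l.length) :
    (List.range n).map (fun k => l.getD k 0) = l.take n := by
  apply List.ext_getElem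
  · simp [List.length_take]; omega
  · intro i h1 h2
    simp at h1
    simp [List.getElem_take, List.getD_eq_getElem, h1, Nat.lt_of_lt_of_le h1 h]

theorem filt_range_zip (c : Int) : ∀ (I S : List Int), I.length ≤ S.length →
    ((List.range I.length).filter (fun k => decide (c = I.getD k 0))).map (fun k => S.getD k 0)
    = ((I.zip S).filter (fun p => decide (c = p.1))).map (fun p => p.2) := by
  intro I
  induction I with
  | nil => simp
  | cons i I' ih =>
      intro S hle
      cases S with
      | nil => simp at hle
      | cons s S' =>
          simp only [List.length_cons, List.range_succ_eq_map, List.filter_cons,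
            List.zip_cons_cons]
          have hih := ih S' (by simpa using hle)
          by_cases hc : c = i
          · subst hc
            simp only [List.filter_map, List.map_map] at hih ⊢
            simp [List.filter_cons]
            simpa [Function.comp_def, List.getD_eq_getElem?_getD] using hih
          · simp only [List.filter_map, List.map_map] at hih ⊢
            simp [List.filter_cons, hc]
            simpa [Function.comp_def, List.getD_eq_getElem?_getD] using hih

theorem filt_zip_unique (c : Int) : ∀ (I S : List Int), I.Nodup → c ∈ I → I.length ≤ S.length →
    ∃ v, (I.zip S).filter (fun p => decide (c = p.1)) = [(c, v)] := by
  intro I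
  induction I with
  | nil => simp
  | cons i I' ih =>
      intro S hnd hc hle
      cases S with
      | nil => simp at hle
      | cons s S' =>
          simp only [List.zip_cons_cons, List.filter_cons]
          by_cases hci : c = i
          · subst hci
            simp only [decide_true]
            refine ⟨s, ?_⟩
            have hnotin : c ∉ I' := (List.nodup_cons.mp hnd).1
            have : (I'.zip S').filter (fun p => decide (c = p.1)) = [] := by
              apply List.filter_eq_nil_iff.mpr
              intro p hp hdec
              exact hnotin (by
                have := List.of_mem_zip hp
                simp at hdec
                exact hdec ▸ this.1)
            simp [this]
          · simp only [hci, decide_false]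
            exact ih S' (List.nodup_cons.mp hnd).2 (by simpa [hci] using hc) (by simpa using hle)

theorem items_ofList_zip (I S : List Int) (hnd : I.Nodup) (hle : I.length ≤ S.length) :
    (PySem.Dict.ofList (I.zip S)).items = I.zip S := by
  have hfst : (I.zip S).map Prod.fst = I := List.map_fst_zip hle
  have h1 : ∀ a ∈ I.zip S, (PySem.Dict.empty : PySem.Dict Int Int).contains a.1 = false := by
    intro a _; simp [PySem.Dict.contains_empty]
  have h2 : ((I.zip S).map Prod.fst).Nodup := by rw [hfst]; exact hnd
  have := PySem.Dict.items_foldl_insert_fresh (I.zip S) Prod.fst Prod.snd PySem.Dict.empty h1 h2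
  simpa using this

theorem inner_scan (N : Int) (I S rest : List Int) (c : Int) (hN : 0 ≤ N)
    (hnd : I.Nodup) (hlenI : I.length = N.toNat) (hlenS : S.length = N.toNat)
    (hc : c ∈ I) (acc : List Int) :
    (PySem.List.pyRange 0 N 1).foldl
      (fun acc2 y => if c = PySem.List.pyGetD I y 0 then acc2 ++ [PySem.List.pyGetD (S ++ rest) y 0] else acc2) acc
    = acc ++ [(PySem.Dict.ofList (I.zip S)).getD c 0] := by
  have hbody : (fun (acc2 : List Int) (y : Int) => if c = PySem.List.pyGetD I y 0 then acc2 ++ [PySem.List.pyGetD (S ++ rest) y 0] else acc2)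
      = (fun acc2 y => if (fun y => decide (c = PySem.List.pyGetD I y 0)) y = true then acc2 ++ [(fun y => PySem.List.pyGetD (S ++ rest) y 0) y] else acc2) := by
    funext acc2 y; simp
  rw [hbody, PySem.List.foldl_append_if]
  congr 1
  -- reduce the pyRange to List.range
  have hrange : PySem.List.pyRange 0 N 1 = List.map (fun (k : Nat) => (k : Int)) (List.range I.length) := by
    rw [PySem.List.pyRange_one]
    simp only [sub_zero, zero_add, hlenI]
  rw [hrange, List.filter_map, List.map_map]
  simp only [Function.comp_def, PySem.List.pyGetD_natCast]
  have hle : I.length ≤ (S ++ rest).length := by simp [hlenI, hlenS]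
  rw [filt_range_zip c I (S ++ rest) hle]
  have hzip : I.zip (S ++ rest) = I.zip S := by
    have := List.zip_append (l₁ := I) (r₁ := ([] : List Int)) (l₂ := S) (r₂ := rest)
      (by omega)
    simpa using this
  rw [hzip]
  obtain ⟨v, hv⟩ := filt_zip_unique c I S hnd hc (by omega)
  rw [hv]
  have hmem : (c, v) ∈ I.zip S := by
    have : (c, v) ∈ (I.zip S).filter (fun p => decide (c = p.1)) := by simp [hv]
    exact List.mem_of_mem_filter this
  have hitems := items_ofList_zip I S hnd (by omega)
  have hkeys : (PySem.Dict.ofList (I.zip S)).keys.Nodup := by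
    have : (PySem.Dict.ofList (I.zip S)).keys = (I.zip S).map Prod.fst := by
      simp [PySem.Dict.keys, hitems]
    rw [this, List.map_fst_zip (by omega)]
    exact hnd
  have := PySem.Dict.getD_of_mem_items (PySem.Dict.ofList (I.zip S)) (hitems ▸ hmem) hkeys 0
  simp [this]

theorem pyrange_map_getD (l : List Int) (N : Int) (h0 : 0 ≤ N) (hle : N.toNat ≤ l.length) :
    (PySem.List.pyRange 0 N 1).map (fun i => PySem.List.pyGetD l i 0) = l.take N.toNat := by
  rw [PySem.List.pyRange_one]
  simp only [sub_zero, zero_add, List.map_map, Function.comp_def, PySem.List.pyGetD_natCast]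
  exact map_getD_range l N.toNat hle

theorem ports_agree (N : Int) (ids salary : List Int)
    (h0 : 0 ≤ N) (hids : N ≤ ids.length) (hsal : N ≤ salary.length)
    (hndI : (ids.take N.toNat).Nodup) (hndS : (salary.take N.toNat).Nodup) :
    SynchronizingTables N ids salary = SynchronizingTables_alt N ids salary := by
  have hidsl : N.toNat ≤ ids.length := by omega
  have hsall : N.toNat ≤ salary.length := by omega
  set n := N.toNat with hn
  set T := ids.take n with hT
  set Sal := salary.take n with hSal
  set I := PySem.List.sorted T (fun x => x) with hI
  set S := PySem.List.sorted Sal (fun x => x) with hS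
  have hTlen : T.length = n := by simp [hT, List.length_take]; omega
  have hSallen : Sal.length = n := by simp [hSal, List.length_take]; omega
  have hIlen : I.length = n := by rw [hI, PySem.List.length_sorted, hTlen]
  have hSlen : S.length = n := by rw [hS, PySem.List.length_sorted, hSallen]
  have hIperm : I.Perm T := PySem.List.sorted_perm T (fun x => x) false
  have hndI' : I.Nodup := hIperm.nodup_iff.mpr hndI
  -- copy_ind = T
  have hcopy : (PySem.List.pyRange 0 N 1).foldl (fun acc i => acc ++ [PySem.List.pyGetD ids i 0]) [] = T := by
    rw [PySem.List.foldl_append_singleton_eq_map]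
    simpa using pyrange_map_getD ids N h0 hidsl
  -- the two sorts
  have hsortsal : pvSortA N salary = S ++ salary.drop n := by
    rw [pvSortA_eq N salary h0 hsal hndS]
  have hsortind : pvSortA N T = I := by
    have hTl : N ≤ (T.length : Int) := by rw [hTlen]; omega
    have : T.take n = T := List.take_of_length_le (by omega)
    rw [pvSortA_eq N T h0 hTl (by rw [this]; exact hndI)]
    rw [this, List.drop_of_length_le (by omega), List.append_nil]
  -- B side
  have hBids : PySem.List.slice ids none (some N) = T := PySem.List.slice_to ids h0
  have hBsal : PySem.List.slice salary none (some N) = Sal := PySem.List.slice_to salary h0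
  simp only [SynchronizingTables, SynchronizingTables_alt]
  rw [hcopy, hsortsal, hBids, hBsal, hsortind]
  -- rewrite the outer loop body via inner_scan
  rw [PySem.List.foldl_congr_mem (PySem.List.pyRange 0 N 1) _
    (fun acc x => acc ++ [(PySem.Dict.ofList (I.zip S)).getD (PySem.List.pyGetD ids x 0) 0]) []
    ?_]
  · rw [PySem.List.foldl_append_singleton_eq_map]
    simp only [List.nil_append]
    rw [show (fun x => (PySem.Dict.ofList (I.zip S)).getD (PySem.List.pyGetD ids x 0) 0)
        = (fun i => (PySem.Dict.ofList (I.zip S)).getD i 0) ∘ (fun x => PySem.List.pyGetD ids x 0) from rfl,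
      ← List.map_map, pyrange_map_getD ids N h0 hidsl]
  · intro acc x hx
    have hxr := PySem.List.mem_pyRange_one.mp hx
    have hxn : x.toNat < n := by omega
    have hmemT : PySem.List.pyGetD ids x 0 ∈ T := by
      rw [PySem.List.pyGetD_of_nonneg ids 0 hxr.1]
      have hxl : x.toNat < ids.length := by omega
      rw [List.getD_eq_getElem ids 0 hxl]
      have : ids[x.toNat] = T[x.toNat]'(by omega) := (List.getElem_take).symm
      rw [this]
      exact List.getElem_mem _
    have hmemI : PySem.List.pyGetD ids x 0 ∈ I := hIperm.mem_iff.mpr hmemT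
    exact inner_scan N I S (salary.drop n) _ h0 hndI' hIlen hSlen hmemI acc

-- ===== VERDICT (by name: the statement is the Claim_ definition above) =====
theorem SynchronizingTables_spec : Claim_equal_SynchronizingTables := by
  intro N ids salary _ hpre
  obtain ⟨h0, hids, hsal, hndI, hndS⟩ := hpre
  unfold Spec_SynchronizingTables
  exact ports_agree N ids salary h0 hids hsal hndI hndS
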